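-- pv_equiv track=rewrite | github.com/jcurcio3105/KoboSoftwareES96 | UI_csv_to_Kobo/backend/uploader.py | parse_form_id_from_link
-- ===== SOURCE A (Python) =====
-- def parse_form_id_from_link(link: str) -> str:
--     if not link:
--         raise ValueError("Empty survey link.")
--     needle = "/forms/"
--     idx = link.find(needle)
--     if idx == -1:
--         raise ValueError("Could not find '/forms/' in link.")
--     tail = link[idx + len(needle):]
--     for sep in ["/", "?", "#"]:
--         cut = tail.find(sep)
--         if cut != -1:
--             tail = tail[:cut]
--     if not tail:
--         raise ValueError("Form ID segment was empty.")
--     return tail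
-- ===== SOURCE B (Python) =====
-- def parse_form_id_from_link(link: str) -> str:
--     if not link:
--         raise ValueError("Empty survey link.")
--     _, marker, rest = link.partition("/forms/")
--     if not marker:
--         raise ValueError("Could not find '/forms/' in link.")
--     form_id = []
--     for ch in rest:
--         if ch in "/?#":
--             break
--         form_id.append(ch)
--     if not form_id:
--         raise ValueError("Form ID segment was empty.")
--     return "".join(form_id)
-- ===== Notes on version B (the rewrite author's own statement) =====
-- stated objective: simpler
-- what changed: B partitions the link on '/forms/' and truncates the remainder with a single character scan that stops at the first of '/', '?', '#', replacing A's three sequential find-and-slice passes; Pre_ excludes exactly the inputs where both programs raise ValueError (empty link, no '/forms/', empty form-id segment).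
import Mathlib
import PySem

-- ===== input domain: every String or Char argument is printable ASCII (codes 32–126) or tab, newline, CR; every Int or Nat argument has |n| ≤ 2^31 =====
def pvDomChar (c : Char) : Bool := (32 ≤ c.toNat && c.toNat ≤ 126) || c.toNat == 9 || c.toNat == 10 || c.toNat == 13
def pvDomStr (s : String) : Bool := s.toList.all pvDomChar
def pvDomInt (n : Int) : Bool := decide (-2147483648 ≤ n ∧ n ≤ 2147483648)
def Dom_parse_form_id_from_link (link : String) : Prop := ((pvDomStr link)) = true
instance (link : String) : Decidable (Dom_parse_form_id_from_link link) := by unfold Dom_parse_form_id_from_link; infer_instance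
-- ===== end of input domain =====

-- B replaces A's three sequential find-and-slice passes by a partition on "/forms/" and a
-- single character scan that stops at the first of '/', '?', '#' (objective: simpler).

-- ===== PORT A =====
-- one iteration of A's 'for sep in ["/", "?", "#"]' body
def pvCutA (tail : List Char) (sep : Char) : List Char :=
  let cut := PySem.Chars.find tail [sep]
  if cut ≠ -1 then PySem.List.slice tail none (some cut) else tail

def parse_form_id_from_link (link : String) : String :=
  let s := link.toList
  let idx := PySem.Chars.find s "/forms/".toList
  let tail0 := PySem.List.slice s (some (idx + 7)) none
  let tail := ['/', '?', '#'].foldl pvCutA tail0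
  String.ofList tail

-- ===== PORT B =====
-- link.partition("/forms/") as (head, marker, rest)
def pvPartitionB (s : List Char) : List Char × List Char × List Char :=
  let i := PySem.Chars.find s "/forms/".toList
  if i = -1 then (s, [], [])
  else (s.take i.toNat, "/forms/".toList, s.drop (i.toNat + 7))

def parse_form_id_from_link_alt (link : String) : String :=
  let p := pvPartitionB link.toList
  String.ofList (p.2.2.takeWhile (fun ch => !(ch = '/' ∨ ch = '?' ∨ ch = '#')))

-- ===== PRECONDITION & SPEC =====
-- Pre_ excludes exactly the inputs on which A raises ValueError: the empty link, links
-- without "/forms/", and links where the segment right after the first "/forms/" is empty.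
def Pre_parse_form_id_from_link (link : String) : Prop :=
  link ≠ "" ∧
  PySem.Str.find link "/forms/" ≠ -1 ∧
  (PySem.Str.pyGet? link (PySem.Str.find link "/forms/" + 7)).any
    (fun c => !(c == '/' || c == '?' || c == '#')) = true
instance (link : String) : Decidable (Pre_parse_form_id_from_link link) := by
  unfold Pre_parse_form_id_from_link; infer_instance

def pvWitness_parse_form_id_from_link : String := "https://kf.kobo.org/forms/aB9?x=1"

def Spec_parse_form_id_from_link (link : String) (out : String) : Prop := out = parse_form_id_from_link_alt link
instance (link : String) (out : String) : Decidable (Spec_parse_form_id_from_link link out) := by unfold Spec_parse_form_id_from_link; infer_instance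

-- ===== CLAIM (what is proved, stated in full; the proofs are below) =====
def Claim_equal_parse_form_id_from_link : Prop := ∀ (link : String), Dom_parse_form_id_from_link link → Pre_parse_form_id_from_link link → Spec_parse_form_id_from_link link (parse_form_id_from_link link)

-- ===== LEMMAS AND PROOFS =====

lemma pv_singleton_prefix_iff (c : Char) (l : List Char) : [c] <+: l ↔ l.head? = some c := by
  cases l with
  | nil => simp
  | cons x xs => simp [List.cons_prefix_cons, eq_comm]

lemma pv_take_eq_takeWhile (p : Char → Bool) (t : List Char) (n : Nat) (hn : n < t.length)
    (hhit : p (t[n]'hn) = false) (hbefore : ∀ i (h : i < n), p (t[i]'(by omega)) = true) :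
    t.take n = t.takeWhile p := by
  induction t generalizing n with
  | nil => simp at hn
  | cons x xs ih =>
    cases n with
    | zero => simp_all [List.takeWhile]
    | succ m =>
      have hx : p x = true := hbefore 0 (by omega)
      simp only [List.take_succ_cons, List.takeWhile, hx, List.cons.injEq, true_and]
      exact ih m (by simpa using hn) (by simpa using hhit)
        (fun i hi => by simpa using hbefore (i + 1) (by omega))

lemma pv_takeWhile_congr {p q : Char → Bool} (h : ∀ x, p x = q x) (l : List Char) :
    l.takeWhile p = l.takeWhile q := by
  induction l with
  | nil => rfl
  | cons x xs ih => simp [List.takeWhile, h x, ih]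

-- one cut pass of A drops everything from the first occurrence of sep
lemma pvCutA_eq_takeWhile (t : List Char) (c : Char) :
    pvCutA t c = t.takeWhile (fun x => x ≠ c) := by
  unfold pvCutA
  by_cases h : PySem.Chars.find t [c] = -1
  · simp only [h, ne_eq, not_true_eq_false, if_false]
    have hni : ¬ [c] <:+: t := (PySem.Chars.find_eq_neg_one_iff t [c]).1 h
    have hmem : c ∉ t := fun hc => hni ((List.singleton_infix_iff c t).2 hc)
    exact (List.takeWhile_eq_self_iff.2 (by
      intro x hx; simp only [decide_eq_true_eq]; rintro rfl; exact hmem hx)).symm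
  · simp only [h, ne_eq, not_false_eq_true, if_true]
    have h0 : 0 ≤ PySem.Chars.find t [c] := by
      have := PySem.Chars.neg_one_le_find t [c]; omega
    obtain ⟨hpref, hmin⟩ := PySem.Chars.find_spec (s := t) (sub := [c]) h0
    set n := (PySem.Chars.find t [c]).toNat with hndef
    have hlen : n < t.length := by
      have hle := PySem.Chars.find_le_length t [c]
      rcases Nat.lt_or_ge n t.length with h' | h'
      · exact h'
      · exfalso
        have : t.drop n = [] := List.drop_eq_nil_of_le h'
        rw [this] at hpref
        simp [List.prefix_nil] at hpref
    rw [PySem.List.slice_to t h0, ← hndef]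
    refine pv_take_eq_takeWhile _ t n hlen ?_ ?_
    · have : (t.drop n).head? = some c := (pv_singleton_prefix_iff c _).1 hpref
      have hg : t[n] = c := by
        rwa [List.head?_drop, List.getElem?_eq_getElem hlen, Option.some.injEq] at this
      simp [hg]
    · intro i hi
      have hnp : ¬ [c] <+: t.drop i := hmin i hi
      have : (t.drop i).head? ≠ some c := fun he => hnp ((pv_singleton_prefix_iff c _).2 he)
      rw [List.head?_drop, List.getElem?_eq_getElem (by omega)] at this
      simp only [ne_eq, decide_eq_true_eq]
      exact fun he => this (by rw [he])

theorem parse_form_id_from_link_spec : Claim_equal_parse_form_id_from_link := by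
  intro link _ hpre
  obtain ⟨-, hfind, -⟩ := hpre
  unfold Spec_parse_form_id_from_link parse_form_id_from_link parse_form_id_from_link_alt pvPartitionB
  have hfind' : PySem.Chars.find link.toList "/forms/".toList ≠ -1 := by
    simpa using hfind
  have h0 : 0 ≤ PySem.Chars.find link.toList "/forms/".toList := by
    have := PySem.Chars.neg_one_le_find link.toList "/forms/".toList; omega
  simp only [hfind', if_false]
  set s := link.toList
  set idx := PySem.Chars.find s "/forms/".toList with hidx
  have hslice : PySem.List.slice s (some (idx + 7)) none = s.drop (idx.toNat + 7) := by
    rw [PySem.List.slice_from s (a := idx + 7) (by omega)]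
    congr 1
    omega
  rw [hslice]
  set rest := s.drop (idx.toNat + 7)
  have hfold : ['/', '?', '#'].foldl pvCutA rest
      = rest.takeWhile (fun ch => !(ch = '/' ∨ ch = '?' ∨ ch = '#')) := by
    simp only [List.foldl_cons, List.foldl_nil, pvCutA_eq_takeWhile, List.takeWhile_takeWhile]
    apply pv_takeWhile_congr
    intro x
    by_cases h1 : x = '/' <;> by_cases h2 : x = '?' <;> by_cases h3 : x = '#' <;>
      simp [h1, h2, h3]
  rw [hfold]
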